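-- pv_equiv track=rewrite | github.com/pypi-data/pypi-mirror-353 | packages/visceral/visceral-0.1.2.tar.gz/visceral-0.1.2/src/visceral/Functions/helper.py | check_keywords_and_create_prompt
-- ===== SOURCE A (Python) =====
-- def check_keywords_and_create_prompt(input_text, keymap_names):
--     # Convert input text and keywords to lowercase for matching
--     input_text_lower = input_text.lower()
--
--     # Check for matches
--     matched_keywords = []
--     original_formatted_keywords = []  # To store the original formatting
--
--     for keyword in keymap_names:
--         keyword_lower = keyword.lower()
--         if keyword_lower in input_text_lower:
--             # Find the position of the keyword in lowercase text
--             start_pos = input_text_lower.find(keyword_lower)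
--             # Extract the original formatted version from input text
--             original_format = input_text[start_pos:start_pos + len(keyword)]
--             original_formatted_keywords.append(original_format)
--             variable_name=keyword
--
--     # Create prompt if exactly one match is found
--     if len(original_formatted_keywords) == 1:
--         return original_formatted_keywords[0], variable_name
--     else:
--         return None, None
-- ===== SOURCE B (Python) =====
-- def check_keywords_and_create_prompt(input_text, keymap_names):
--     # Multi-pattern sliding-window search: for each distinct pattern length L, slide an
--     # L-sized window over the text once and look the window up in the set of lowercased
--     # keywords, recording each keyword's first start position; then one decision pass.
--     tl = input_text.lower()
--     needles = set(k.lower() for k in keymap_names)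
--     first = {}
--     for L in sorted(set(len(kl) for kl in needles)):
--         for i in range(len(tl) - L + 1):
--             w = tl[i:i + L]
--             if w in needles and w not in first:
--                 first[w] = i
--     matched = [(k, first[k.lower()]) for k in keymap_names if k.lower() in first]
--     if len(matched) != 1:
--         return None, None
--     k, i = matched[0]
--     return input_text[i:i + len(k)], k
-- ===== Notes on version B (the rewrite author's own statement) =====
-- stated objective: faster
-- what changed: B replaces A's per-keyword scan (a substring test plus a find per keyword) by a sliding-window multi-pattern search: for each distinct lowercased-keyword length L it slides an L-sized window over the text once, looking the window up in the keyword set and recording each keyword's first start position in a dict, then a single decision pass over the keyword list reads that dict.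
import Mathlib
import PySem

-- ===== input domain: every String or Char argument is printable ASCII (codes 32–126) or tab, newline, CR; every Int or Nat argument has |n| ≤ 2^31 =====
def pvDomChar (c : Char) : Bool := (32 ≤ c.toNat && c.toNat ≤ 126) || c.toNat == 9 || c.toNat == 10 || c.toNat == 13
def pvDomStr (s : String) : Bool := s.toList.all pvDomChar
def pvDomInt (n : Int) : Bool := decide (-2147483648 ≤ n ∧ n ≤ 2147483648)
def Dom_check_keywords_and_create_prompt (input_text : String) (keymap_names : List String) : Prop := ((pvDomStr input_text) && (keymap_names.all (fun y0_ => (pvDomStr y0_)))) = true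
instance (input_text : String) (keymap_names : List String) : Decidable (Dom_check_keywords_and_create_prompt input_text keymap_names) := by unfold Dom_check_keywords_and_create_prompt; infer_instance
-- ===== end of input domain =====

-- B replaces A's per-keyword substring searches by a sliding-window multi-pattern search: one window pass
-- over the text per distinct pattern length, looking each window up in the needle set (objective: faster).


-- ===== PORT A =====
-- literal transliteration of A: one loop over keymap_names accumulating the list of
-- original-format extracts and the last matching keyword (variable_name).
def check_keywords_and_create_prompt (input_text : String) (keymap_names : List String) : Option String × Option String :=
  let input_text_lower := PySem.Str.lower input_text
  let st := keymap_names.foldl (fun (st : List String × Option String) keyword =>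
      let keyword_lower := PySem.Str.lower keyword
      if PySem.Str.isIn keyword_lower input_text_lower then
        let start_pos := PySem.Str.find input_text_lower keyword_lower
        let original_format := PySem.Str.slice input_text (some start_pos) (some (start_pos + PySem.Str.len keyword))
        (st.1 ++ [original_format], some keyword)
      else st) ([], none)
  if st.1.length = 1 then (PySem.List.pyGet? st.1 0, st.2) else (none, none)

-- ===== PORT B =====
-- transliteration of Source B: sliding-window multi-pattern search — for each distinct
-- needle length L, slide an L-sized window over the text once, looking the window up
-- in the needle set and recording first start positions in a dict; then one decision pass.
def check_keywords_and_create_prompt_alt (input_text : String) (keymap_names : List String) : Option String × Option String :=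
  let tl := PySem.Str.lower input_text
  let needles := PySem.Set.ofList (keymap_names.map PySem.Str.lower)
  let lengths := PySem.List.sorted (PySem.Set.ofList (needles.map PySem.Str.len)) (fun x => x) false
  let first : PySem.Dict String Int :=
    lengths.foldl (fun d L =>
      (PySem.List.pyRange 0 (PySem.Str.len tl - L + 1) 1).foldl (fun d i =>
        if needles.contains (PySem.Str.slice tl (some i) (some (i + L))) &&
           !(PySem.Dict.contains d (PySem.Str.slice tl (some i) (some (i + L))))
        then PySem.Dict.insert d (PySem.Str.slice tl (some i) (some (i + L))) i else d) d)
      PySem.Dict.empty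
  let matched := keymap_names.filterMap (fun k =>
      (PySem.Dict.get? first (PySem.Str.lower k)).map (fun i => (k, i)))
  match matched with
  | [(k, i)] => (some (PySem.Str.slice input_text (some i) (some (i + PySem.Str.len k))), some k)
  | _ => (none, none)

-- ===== PRECONDITION & SPEC =====
def Spec_check_keywords_and_create_prompt (input_text : String) (keymap_names : List String) (out : Option String × Option String) : Prop := out = check_keywords_and_create_prompt_alt input_text keymap_names
instance (input_text : String) (keymap_names : List String) (out : Option String × Option String) : Decidable (Spec_check_keywords_and_create_prompt input_text keymap_names out) := by unfold Spec_check_keywords_and_create_prompt; infer_instance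

-- ===== CLAIM (what is proved, stated in full; the proofs are below) =====
def Claim_equal_check_keywords_and_create_prompt : Prop := ∀ (input_text : String) (keymap_names : List String), Dom_check_keywords_and_create_prompt input_text keymap_names → Spec_check_keywords_and_create_prompt input_text keymap_names (check_keywords_and_create_prompt input_text keymap_names)

-- ===== LEMMAS AND PROOFS =====

-- getLast? of a cons: the head only survives if the tail is empty
lemma pv_getLast?_cons_or {α : Type} (a : α) (l : List α) (v : Option α) :
    ((a :: l).getLast?).or v = (l.getLast?).or (some a) := by
  cases l with
  | nil => rfl
  | cons b t =>
    rw [List.getLast?_cons_cons]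
    cases hl : (b :: t).getLast? with
    | none => simp at hl
    | some x => simp [Option.or]

-- A's loop computes the map of the extract function over the filtered keywords,
-- and variable_name is the last matching keyword.
lemma pv_foldA (p : String → Bool) (f : String → String) (ks : List String)
    (acc : List String) (v : Option String) :
    ks.foldl (fun (st : List String × Option String) k =>
        if p k then (st.1 ++ [f k], some k) else st) (acc, v)
      = (acc ++ (ks.filter p).map f, ((ks.filter p).getLast?).or v) := by
  induction ks generalizing acc v with
  | nil => simp
  | cons k t ih =>
    by_cases h : p k
    · simp [List.foldl_cons, h, ih, pv_getLast?_cons_or]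
    · simp [List.foldl_cons, h, ih]

-- an L-sized window of the text equals kl iff kl has length L and starts there
lemma pv_window (tl kl : String) (m L : Nat) (hm : m + L ≤ tl.toList.length) :
    (PySem.Str.slice tl (some (m:Int)) (some ((m:Int) + (L:Int))) = kl)
      ↔ (kl.toList.length = L ∧ kl.toList <+: tl.toList.drop m) := by
  constructor
  · intro h
    have h2 := congrArg String.toList h
    rw [PySem.Str.toList_slice, PySem.Chars.slice_eq_listSlice, PySem.List.slice_natCast_add] at h2
    have hlen : kl.toList.length = L := by
      rw [← h2, List.length_take, List.length_drop]
      omega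
    refine ⟨hlen, ?_⟩
    rw [← h2]
    exact List.take_prefix _ _
  · rintro ⟨hlen, hpre⟩
    apply String.ext
    rw [PySem.Str.toList_slice, PySem.Chars.slice_eq_listSlice, PySem.List.slice_natCast_add]
    rw [List.prefix_iff_eq_take] at hpre
    rw [← hlen]
    exact hpre.symm

-- the effect of one window step on one key of the dict
lemma pv_step (tl kl : String) (ns : List String) (L : Nat) (m : Nat)
    (hm : m + L ≤ tl.toList.length) (d : PySem.Dict String Int) :
    ((if PySem.Set.contains ns (PySem.Str.slice tl (some (m:Int)) (some ((m:Int) + (L:Int)))) &&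
         !(PySem.Dict.contains d (PySem.Str.slice tl (some (m:Int)) (some ((m:Int) + (L:Int)))))
      then PySem.Dict.insert d (PySem.Str.slice tl (some (m:Int)) (some ((m:Int) + (L:Int)))) (m:Int)
      else d).get? kl)
    = if kl ∈ ns ∧ kl.toList.length = L ∧ kl.toList <+: tl.toList.drop m ∧ d.get? kl = none
      then some (m:Int) else d.get? kl := by
  by_cases hw : PySem.Str.slice tl (some (m:Int)) (some ((m:Int) + (L:Int))) = kl
  · rw [hw]
    have hwin := (pv_window tl kl m L hm).mp hw
    rw [PySem.Dict.contains_eq_isSome_get?]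
    by_cases hmem : kl ∈ ns
    · have hcont : PySem.Set.contains ns kl = true := (PySem.Set.contains_iff ns kl).mpr hmem
      cases hd : d.get? kl with
      | none =>
        rw [hcont]
        simp [hd, hmem, hwin.1, hwin.2, PySem.Dict.get?_insert_self]
      | some v =>
        rw [hcont]
        simp [hd]
    · have hcont : PySem.Set.contains ns kl = false := by
        rw [Bool.eq_false_iff]
        exact fun h => hmem ((PySem.Set.contains_iff ns kl).mp h)
      rw [hcont]
      simp only [Bool.false_and]
      rw [if_neg (by simp), if_neg (fun h => hmem h.1)]
  · have hnc : ¬(kl ∈ ns ∧ kl.toList.length = L ∧ kl.toList <+: tl.toList.drop m ∧ d.get? kl = none) :=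
      fun h => hw ((pv_window tl kl m L hm).mpr ⟨h.2.1, h.2.2.1⟩)
    rw [if_neg hnc]
    split
    · exact PySem.Dict.get?_insert_of_ne d (m:Int) (fun he => hw he.symm)
    · rfl

-- one whole window pass (positions 0..m-1) for a fixed length L
lemma pv_posfold (tl kl : String) (ns : List String) (L : Nat) (m : Nat)
    (hm : m + L ≤ tl.toList.length + 1) (d : PySem.Dict String Int) :
    ((PySem.List.pyRange 0 (m:Int) 1).foldl (fun d i =>
        if PySem.Set.contains ns (PySem.Str.slice tl (some i) (some (i + (L:Int)))) &&
           !(PySem.Dict.contains d (PySem.Str.slice tl (some i) (some (i + (L:Int)))))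
        then PySem.Dict.insert d (PySem.Str.slice tl (some i) (some (i + (L:Int)))) i else d) d).get? kl
    = if kl ∈ ns ∧ kl.toList.length = L ∧ d.get? kl = none
          ∧ 0 ≤ PySem.Chars.find tl.toList kl.toList ∧ PySem.Chars.find tl.toList kl.toList < (m:Int)
      then some (PySem.Chars.find tl.toList kl.toList) else d.get? kl := by
  induction m with
  | zero =>
    rw [show ((0:Nat):Int) = 0 from rfl, PySem.List.pyRange_one_eq_nil (le_refl 0), List.foldl_nil, if_neg]
    rintro ⟨-, -, -, hf0, hlt⟩
    omega
  | succ m ih =>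
    have hcast : ((m+1:Nat):Int) = (m:Int)+1 := by push_cast; ring
    have hsplit : PySem.List.pyRange 0 ((m+1:Nat):Int) 1 = PySem.List.pyRange 0 (m:Int) 1 ++ [(m:Int)] := by
      rw [hcast]
      exact PySem.List.pyRange_one_succ_right (by positivity)
    rw [hsplit, List.foldl_append, List.foldl_cons, List.foldl_nil,
        pv_step tl kl ns L m (by omega) _, ih (by omega), hcast]
    by_cases hmem : kl ∈ ns
    · by_cases hQ : kl.toList.length = L
      · by_cases hD : d.get? kl = none
        · by_cases hC1 : 0 ≤ PySem.Chars.find tl.toList kl.toList ∧ PySem.Chars.find tl.toList kl.toList < (m:Int)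
          · have hprev : (if kl ∈ ns ∧ kl.toList.length = L ∧ d.get? kl = none
                  ∧ 0 ≤ PySem.Chars.find tl.toList kl.toList ∧ PySem.Chars.find tl.toList kl.toList < (m:Int)
                then some (PySem.Chars.find tl.toList kl.toList) else d.get? kl)
                = some (PySem.Chars.find tl.toList kl.toList) := if_pos ⟨hmem, hQ, hD, hC1.1, hC1.2⟩
            rw [hprev, if_neg (fun h => Option.some_ne_none _ h.2.2.2), if_pos ⟨hmem, hQ, hD, hC1.1, by omega⟩]
          · have hprev : (if kl ∈ ns ∧ kl.toList.length = L ∧ d.get? kl = none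
                  ∧ 0 ≤ PySem.Chars.find tl.toList kl.toList ∧ PySem.Chars.find tl.toList kl.toList < (m:Int)
                then some (PySem.Chars.find tl.toList kl.toList) else d.get? kl)
                = d.get? kl := if_neg (fun h => hC1 ⟨h.2.2.2.1, h.2.2.2.2⟩)
            rw [hprev]
            by_cases hRm : kl.toList <+: tl.toList.drop m
            · have hinf : kl.toList <:+: tl.toList :=
                (List.IsPrefix.isInfix hRm).trans (List.IsSuffix.isInfix (List.drop_suffix m tl.toList))
              have hf0 : 0 ≤ PySem.Chars.find tl.toList kl.toList := (PySem.Chars.find_nonneg_iff _ _).mpr hinf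
              have hspec := PySem.Chars.find_spec hf0
              have hle : PySem.Chars.find tl.toList kl.toList ≤ (m:Int) := by
                by_contra hgt
                push_neg at hgt
                exact (hspec.2 m (by omega)) hRm
              have heq : PySem.Chars.find tl.toList kl.toList = (m:Int) := by omega
              rw [if_pos ⟨hmem, hQ, hRm, hD⟩, if_pos ⟨hmem, hQ, hD, hf0, by omega⟩, heq]
            · rw [if_neg (fun h => hRm h.2.2.1), if_neg]
              rintro ⟨-, -, -, hf0, hlt⟩
              have heq : PySem.Chars.find tl.toList kl.toList = (m:Int) := by omega
              apply hRm
              have := (PySem.Chars.find_spec (s := tl.toList) (sub := kl.toList) hf0).1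
              rwa [heq, Int.toNat_natCast] at this
        · have hprev : (if kl ∈ ns ∧ kl.toList.length = L ∧ d.get? kl = none
                ∧ 0 ≤ PySem.Chars.find tl.toList kl.toList ∧ PySem.Chars.find tl.toList kl.toList < (m:Int)
              then some (PySem.Chars.find tl.toList kl.toList) else d.get? kl)
              = d.get? kl := if_neg (fun h => hD h.2.2.1)
          rw [hprev, if_neg (fun h => hD h.2.2.2), if_neg (fun h => hD h.2.2.1)]
      · have hprev : (if kl ∈ ns ∧ kl.toList.length = L ∧ d.get? kl = none
              ∧ 0 ≤ PySem.Chars.find tl.toList kl.toList ∧ PySem.Chars.find tl.toList kl.toList < (m:Int)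
            then some (PySem.Chars.find tl.toList kl.toList) else d.get? kl)
            = d.get? kl := if_neg (fun h => hQ h.2.1)
        rw [hprev, if_neg (fun h => hQ h.2.1), if_neg (fun h => hQ h.2.1)]
    · have hprev : (if kl ∈ ns ∧ kl.toList.length = L ∧ d.get? kl = none
            ∧ 0 ≤ PySem.Chars.find tl.toList kl.toList ∧ PySem.Chars.find tl.toList kl.toList < (m:Int)
          then some (PySem.Chars.find tl.toList kl.toList) else d.get? kl)
          = d.get? kl := if_neg (fun h => hmem h.1)
      rw [hprev, if_neg (fun h => hmem h.1), if_neg (fun h => hmem h.1)]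

-- the full pass for one length value L (possibly longer than the text)
lemma pv_pass (tl kl : String) (ns : List String) (L : Int) (hL : 0 ≤ L) (d : PySem.Dict String Int) :
    ((PySem.List.pyRange 0 (PySem.Str.len tl - L + 1) 1).foldl (fun d i =>
        if PySem.Set.contains ns (PySem.Str.slice tl (some i) (some (i + L))) &&
           !(PySem.Dict.contains d (PySem.Str.slice tl (some i) (some (i + L))))
        then PySem.Dict.insert d (PySem.Str.slice tl (some i) (some (i + L))) i else d) d).get? kl
    = if kl ∈ ns ∧ ((kl.toList.length : Int) = L) ∧ d.get? kl = none
          ∧ 0 ≤ PySem.Chars.find tl.toList kl.toList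
      then some (PySem.Chars.find tl.toList kl.toList) else d.get? kl := by
  obtain ⟨LN, rfl⟩ : ∃ LN : Nat, L = (LN:Int) := ⟨L.toNat, (Int.toNat_of_nonneg hL).symm⟩
  by_cases hbig : LN ≤ tl.toList.length
  · have hb : PySem.Str.len tl - (LN:Int) + 1 = ((tl.toList.length - LN + 1 : Nat) : Int) := by
      rw [PySem.Str.len_eq]
      omega
    rw [hb, pv_posfold tl kl ns LN _ (by omega) d]
    by_cases hmem : kl ∈ ns
    · by_cases hQ : kl.toList.length = LN
      · by_cases hD : d.get? kl = none
        · by_cases hf0 : 0 ≤ PySem.Chars.find tl.toList kl.toList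
          · have hroom : PySem.Chars.find tl.toList kl.toList < ((tl.toList.length - LN + 1 : Nat) : Int) := by
              have hspec := (PySem.Chars.find_spec (s := tl.toList) (sub := kl.toList) hf0).1
              have hlen := List.IsPrefix.length_le hspec
              rw [List.length_drop] at hlen
              have hfle := PySem.Chars.find_le_length tl.toList kl.toList
              omega
            rw [if_pos ⟨hmem, hQ, hD, hf0, hroom⟩, if_pos ⟨hmem, by exact_mod_cast congrArg Nat.cast hQ, hD, hf0⟩]
          · rw [if_neg (fun h => hf0 h.2.2.2.1), if_neg (fun h => hf0 h.2.2.2)]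
        · rw [if_neg (fun h => hD h.2.2.1), if_neg (fun h => hD h.2.2.1)]
      · have hQ' : ¬ ((kl.toList.length : Int) = (LN:Int)) := fun h => hQ (by exact_mod_cast h)
        rw [if_neg (fun h => hQ h.2.1), if_neg (fun h => hQ' h.2.1)]
    · rw [if_neg (fun h => hmem h.1), if_neg (fun h => hmem h.1)]
  · have hb : PySem.Str.len tl - (LN:Int) + 1 ≤ 0 := by
      rw [PySem.Str.len_eq]
      omega
    rw [PySem.List.pyRange_one_eq_nil hb, List.foldl_nil, if_neg]
    rintro ⟨hmem, hlen, hD, hf0⟩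
    have hspec := (PySem.Chars.find_spec (s := tl.toList) (sub := kl.toList) hf0).1
    have hle := List.IsPrefix.length_le hspec
    rw [List.length_drop] at hle
    omega

-- chaining the passes over the list of distinct lengths
lemma pv_passes (tl kl : String) (ns : List String) (Ls : List Int)
    (hLs : ∀ L ∈ Ls, 0 ≤ L) (d : PySem.Dict String Int) :
    ((Ls.foldl (fun d L =>
        (PySem.List.pyRange 0 (PySem.Str.len tl - L + 1) 1).foldl (fun d i =>
          if PySem.Set.contains ns (PySem.Str.slice tl (some i) (some (i + L))) &&
             !(PySem.Dict.contains d (PySem.Str.slice tl (some i) (some (i + L))))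
          then PySem.Dict.insert d (PySem.Str.slice tl (some i) (some (i + L))) i else d) d) d).get? kl)
    = if kl ∈ ns ∧ ((kl.toList.length : Int) ∈ Ls) ∧ 0 ≤ PySem.Chars.find tl.toList kl.toList
          ∧ d.get? kl = none
      then some (PySem.Chars.find tl.toList kl.toList) else d.get? kl := by
  induction Ls generalizing d with
  | nil => simp
  | cons L Ls' ih =>
    rw [List.foldl_cons, ih (fun x hx => hLs x (List.mem_cons_of_mem _ hx)),
        pv_pass tl kl ns L (hLs L List.mem_cons_self) d]
    by_cases hmem : kl ∈ ns
    · by_cases hf0 : 0 ≤ PySem.Chars.find tl.toList kl.toList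
      · by_cases hD : d.get? kl = none
        · by_cases hlen : (kl.toList.length : Int) = L
          · have hin : (if kl ∈ ns ∧ ((kl.toList.length : Int) = L) ∧ d.get? kl = none
                  ∧ 0 ≤ PySem.Chars.find tl.toList kl.toList
                then some (PySem.Chars.find tl.toList kl.toList) else d.get? kl)
                = some (PySem.Chars.find tl.toList kl.toList) := if_pos ⟨hmem, hlen, hD, hf0⟩
            rw [hin, if_neg (fun h => Option.some_ne_none _ h.2.2.2),
                if_pos ⟨hmem, List.mem_cons.mpr (Or.inl hlen), hf0, hD⟩]
          · have hin : (if kl ∈ ns ∧ ((kl.toList.length : Int) = L) ∧ d.get? kl = none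
                  ∧ 0 ≤ PySem.Chars.find tl.toList kl.toList
                then some (PySem.Chars.find tl.toList kl.toList) else d.get? kl)
                = d.get? kl := if_neg (fun h => hlen h.2.1)
            rw [hin]
            by_cases hmm : (kl.toList.length : Int) ∈ Ls'
            · rw [if_pos ⟨hmem, hmm, hf0, hD⟩, if_pos ⟨hmem, List.mem_cons.mpr (Or.inr hmm), hf0, hD⟩]
            · rw [if_neg (fun h => hmm h.2.1), if_neg]
              rintro ⟨-, hc, -, -⟩
              rcases List.mem_cons.mp hc with h | h
              · exact hlen h
              · exact hmm h
        · have hin : (if kl ∈ ns ∧ ((kl.toList.length : Int) = L) ∧ d.get? kl = none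
                ∧ 0 ≤ PySem.Chars.find tl.toList kl.toList
              then some (PySem.Chars.find tl.toList kl.toList) else d.get? kl)
              = d.get? kl := if_neg (fun h => hD h.2.2.1)
          rw [hin, if_neg (fun h => hD h.2.2.2), if_neg (fun h => hD h.2.2.2)]
      · have hin : (if kl ∈ ns ∧ ((kl.toList.length : Int) = L) ∧ d.get? kl = none
              ∧ 0 ≤ PySem.Chars.find tl.toList kl.toList
            then some (PySem.Chars.find tl.toList kl.toList) else d.get? kl)
            = d.get? kl := if_neg (fun h => hf0 h.2.2.2)
        rw [hin, if_neg (fun h => hf0 h.2.2.1), if_neg (fun h => hf0 h.2.2.1)]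
    · have hin : (if kl ∈ ns ∧ ((kl.toList.length : Int) = L) ∧ d.get? kl = none
            ∧ 0 ≤ PySem.Chars.find tl.toList kl.toList
          then some (PySem.Chars.find tl.toList kl.toList) else d.get? kl)
          = d.get? kl := if_neg (fun h => hmem h.1)
      rw [hin, if_neg (fun h => hmem h.1), if_neg (fun h => hmem h.1)]

-- a filterMap whose option is some exactly on the filtered elements is a filter+map
lemma pv_filterMap_eq {α β : Type} (l : List α) (g : α → Option β) (p : α → Bool) (h : α → β)
    (hg : ∀ x ∈ l, g x = if p x then some (h x) else none) :
    l.filterMap g = (l.filter p).map h := by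
  induction l with
  | nil => simp
  | cons x t ih =>
    have hx := hg x (List.mem_cons_self)
    have ht := ih (fun y hy => hg y (List.mem_cons_of_mem _ hy))
    by_cases hp : p x
    · simp [List.filterMap_cons, hx, hp, ht]
    · simp [List.filterMap_cons, hx, hp, ht]

-- ===== VERDICT (by name: the statement is the Claim_ definition above) =====
theorem check_keywords_and_create_prompt_spec : Claim_equal_check_keywords_and_create_prompt := by
  intro input_text keymap_names _
  unfold Spec_check_keywords_and_create_prompt
  simp only [check_keywords_and_create_prompt, check_keywords_and_create_prompt_alt]
  rw [pv_foldA (fun k => PySem.Str.isIn (PySem.Str.lower k) (PySem.Str.lower input_text))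
        (fun k => PySem.Str.slice input_text
          (some (PySem.Str.find (PySem.Str.lower input_text) (PySem.Str.lower k)))
          (some (PySem.Str.find (PySem.Str.lower input_text) (PySem.Str.lower k) + PySem.Str.len k)))]
  have hLs : ∀ L ∈ PySem.List.sorted (PySem.Set.ofList ((PySem.Set.ofList (keymap_names.map PySem.Str.lower)).map PySem.Str.len)) (fun x => x) false, 0 ≤ L := by
    intro L hL
    rw [PySem.List.mem_sorted, PySem.Set.mem_ofList] at hL
    obtain ⟨s, -, rfl⟩ := List.mem_map.mp hL
    rw [PySem.Str.len_eq]
    positivity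
  have hget : ∀ s : String,
      ((PySem.List.sorted (PySem.Set.ofList ((PySem.Set.ofList (keymap_names.map PySem.Str.lower)).map PySem.Str.len)) (fun x => x) false).foldl (fun d L =>
        (PySem.List.pyRange 0 (PySem.Str.len (PySem.Str.lower input_text) - L + 1) 1).foldl (fun d i =>
          if (PySem.Set.ofList (keymap_names.map PySem.Str.lower)).contains (PySem.Str.slice (PySem.Str.lower input_text) (some i) (some (i + L))) &&
             !(PySem.Dict.contains d (PySem.Str.slice (PySem.Str.lower input_text) (some i) (some (i + L))))
          then PySem.Dict.insert d (PySem.Str.slice (PySem.Str.lower input_text) (some i) (some (i + L))) i else d) d)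
        PySem.Dict.empty).get? s
      = if s ∈ PySem.Set.ofList (keymap_names.map PySem.Str.lower)
            ∧ 0 ≤ PySem.Chars.find (PySem.Str.lower input_text).toList s.toList
        then some (PySem.Chars.find (PySem.Str.lower input_text).toList s.toList) else none := by
    intro s
    rw [pv_passes (PySem.Str.lower input_text) s (PySem.Set.ofList (keymap_names.map PySem.Str.lower)) _ hLs PySem.Dict.empty, PySem.Dict.get?_empty]
    by_cases hmem : s ∈ PySem.Set.ofList (keymap_names.map PySem.Str.lower)
    · have hlenmem : ((s.toList.length : Int)) ∈ PySem.List.sorted (PySem.Set.ofList ((PySem.Set.ofList (keymap_names.map PySem.Str.lower)).map PySem.Str.len)) (fun x => x) false := by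
        rw [PySem.List.mem_sorted, PySem.Set.mem_ofList]
        have := List.mem_map_of_mem (f := PySem.Str.len) hmem
        rwa [PySem.Str.len_eq] at this
      by_cases hf0 : 0 ≤ PySem.Chars.find (PySem.Str.lower input_text).toList s.toList
      · rw [if_pos ⟨hmem, hlenmem, hf0, rfl⟩, if_pos ⟨hmem, hf0⟩]
      · rw [if_neg (fun h => hf0 h.2.2.1), if_neg (fun h => hf0 h.2)]
    · rw [if_neg (fun h => hmem h.1), if_neg (fun h => hmem h.1)]
  simp only [hget]
  rw [pv_filterMap_eq keymap_names _
        (fun k => PySem.Str.isIn (PySem.Str.lower k) (PySem.Str.lower input_text))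
        (fun k => (k, PySem.Chars.find (PySem.Str.lower input_text).toList (PySem.Str.lower k).toList))
        (by
          intro k hk
          have hmem : PySem.Str.lower k ∈ PySem.Set.ofList (keymap_names.map PySem.Str.lower) := by
            rw [PySem.Set.mem_ofList]
            exact List.mem_map_of_mem hk
          by_cases hin : PySem.Str.isIn (PySem.Str.lower k) (PySem.Str.lower input_text) = true
          · have hf0 : 0 ≤ PySem.Chars.find (PySem.Str.lower input_text).toList (PySem.Str.lower k).toList := by
              rw [PySem.Chars.find_nonneg_iff]
              exact (PySem.Str.isIn_iff_infix _ _).mp hin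
            rw [if_pos ⟨hmem, hf0⟩, if_pos hin]
            rfl
          · have hf0 : ¬ 0 ≤ PySem.Chars.find (PySem.Str.lower input_text).toList (PySem.Str.lower k).toList := by
              rw [PySem.Chars.find_nonneg_iff]
              intro hinf
              exact hin ((PySem.Str.isIn_iff_infix _ _).mpr hinf)
            rw [if_neg (fun h => hf0 h.2), if_neg hin]
            rfl)]
  cases hfil : keymap_names.filter (fun k => PySem.Str.isIn (PySem.Str.lower k) (PySem.Str.lower input_text)) with
  | nil => simp
  | cons k t =>
    cases t with
    | nil =>
      simp [PySem.List.pyGet?, PySem.List.pyIdx?, PySem.Str.find_eq]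
    | cons k2 t2 => simp
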